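-- pv_equiv track=rewrite | github.com/Creeper0809/PCFGCracking | lib/training/detectors/alphabet_detection.py | merge_letter_chunks
-- ===== SOURCE A (Python) =====
-- from typing import List, Tuple, Optional, Set
--
-- def merge_letter_chunks(chunks: List[str]) -> List[Tuple[str, Optional[str]]]:
--     out = []
--     for chunk in chunks:
--         if chunk.isalpha():
--             if out and out[-1][1] is not None:
--                 prev, _ = out.pop()
--                 chunk = prev + chunk
--             out.append((chunk, f"A{len(chunk)}"))
--         else:
--             out.append((chunk, None))
--     return out
-- ===== SOURCE B (Python) =====
-- def merge_letter_chunks(chunks):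
--     out = []
--     i = 0
--     n = len(chunks)
--     while i < n:
--         c = chunks[i]
--         if c.isalpha():
--             j = i + 1
--             while j < n and chunks[j].isalpha():
--                 j += 1
--             merged = "".join(chunks[i:j])
--             out.append((merged, f"A{len(merged)}"))
--             i = j
--         else:
--             out.append((c, None))
--             i += 1
--     return out
-- ===== Notes on version B (the rewrite author's own statement) =====
-- stated objective: faster
-- what changed: B computes each maximal run of adjacent alphabetic chunks up front (scan-ahead, then one ''.join per run) instead of A's on-the-fly merging that pops the last output entry and re-concatenates the growing merged string on every alphabetic chunk.
import Mathlib
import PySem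

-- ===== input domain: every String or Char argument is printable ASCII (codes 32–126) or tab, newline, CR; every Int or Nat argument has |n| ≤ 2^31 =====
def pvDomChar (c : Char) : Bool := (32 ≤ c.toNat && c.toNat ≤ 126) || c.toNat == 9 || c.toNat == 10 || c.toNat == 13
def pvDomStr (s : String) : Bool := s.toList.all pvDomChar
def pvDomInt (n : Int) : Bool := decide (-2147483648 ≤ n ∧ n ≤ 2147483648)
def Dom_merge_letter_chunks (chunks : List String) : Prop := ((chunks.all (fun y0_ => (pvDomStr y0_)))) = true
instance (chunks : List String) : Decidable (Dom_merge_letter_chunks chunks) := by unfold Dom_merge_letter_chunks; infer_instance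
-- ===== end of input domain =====

-- B groups each maximal run of adjacent alphabetic chunks up front (scan-ahead + one join)
-- instead of A's on-the-fly merging that pops and rebuilds the last output entry; same results.

-- ===== PORT A =====
-- the length tag f"A{len(chunk)}"
def pvTag (s : String) : String := "A" ++ PySem.Int.toStr (PySem.Str.len s)

-- one iteration of A's 'for chunk in chunks' loop over the accumulator 'out'
def pvStepA (out : List (String × Option String)) (chunk : String) : List (String × Option String) :=
  if PySem.Str.strIsalpha chunk then
    match out.getLast? with
    | some (prev, some _) =>
        -- 'prev, _ = out.pop(); chunk = prev + chunk'
        (out.dropLast) ++ [(prev ++ chunk, some (pvTag (prev ++ chunk)))]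
    | _ => out ++ [(chunk, some (pvTag chunk))]
  else
    out ++ [(chunk, none)]

def merge_letter_chunks (chunks : List String) : List (String × Option String) :=
  chunks.foldl pvStepA []

-- ===== PORT B =====
-- Source B's outer while-loop: take the current chunk; if alphabetic, scan ahead over the
-- maximal alphabetic run (inner while j), join it, emit one tagged pair; else emit (c, None).
def pvGoB : List String → List (String × Option String)
  | [] => []
  | c :: rest =>
    if PySem.Str.strIsalpha c then
      let run := rest.takeWhile (fun s => PySem.Str.strIsalpha s)
      let merged := PySem.Str.join "" (c :: run)
      (merged, pvTag merged) :: pvGoB (rest.dropWhile (fun s => PySem.Str.strIsalpha s))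
    else
      (c, none) :: pvGoB rest
termination_by l => l.length
decreasing_by
  · simpa using Nat.lt_succ_of_le (List.length_dropWhile_le _ rest)
  · simp

def merge_letter_chunks_alt (chunks : List String) : List (String × Option String) :=
  pvGoB chunks

-- ===== PRECONDITION & SPEC =====
def Spec_merge_letter_chunks (chunks : List String) (out : List (String × Option String)) : Prop := out = merge_letter_chunks_alt chunks
instance (chunks : List String) (out : List (String × Option String)) : Decidable (Spec_merge_letter_chunks chunks out) := by unfold Spec_merge_letter_chunks; infer_instance

-- ===== CLAIM (what is proved, stated in full; the proofs are below) =====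
def Claim_equal_merge_letter_chunks : Prop := ∀ (chunks : List String), Dom_merge_letter_chunks chunks → Spec_merge_letter_chunks chunks (merge_letter_chunks chunks)

-- ===== LEMMAS AND PROOFS =====

-- ''.join over a cons peels off the head when the separator is empty
theorem pvJoin_cons (c : String) (l : List String) :
    PySem.Str.join "" (c :: l) = c ++ PySem.Str.join "" l := by
  cases l with
  | nil => simp [PySem.Str.join, PySem.Chars.join_singleton, PySem.Chars.join_nil]
  | cons b t => simp [PySem.Str.join, PySem.Chars.join_cons_cons]

-- the accumulator's last entry (if any) is untagged
def pvNoPend (out : List (String × Option String)) : Prop :=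
  ∀ pr t, out.getLast? = some (pr, t) → t = none

-- Main invariant, strong induction on the remaining input:
-- (1) from an accumulator with no pending alphabetic entry, A's loop appends exactly B's output;
-- (2) with a pending alphabetic entry (p, tag p) last, A's loop absorbs the leading alphabetic
--     run into p and then continues as in (1).
theorem pvMain (n : Nat) : ∀ (xs : List String), xs.length ≤ n →
    (∀ acc, pvNoPend acc → xs.foldl pvStepA acc = acc ++ pvGoB xs) ∧
    (∀ acc p, xs.foldl pvStepA (acc ++ [(p, some (pvTag p))]) =
      acc ++ (p ++ PySem.Str.join "" (xs.takeWhile (fun s => PySem.Str.strIsalpha s)),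
              some (pvTag (p ++ PySem.Str.join "" (xs.takeWhile (fun s => PySem.Str.strIsalpha s)))))
          :: pvGoB (xs.dropWhile (fun s => PySem.Str.strIsalpha s))) := by
  induction n with
  | zero =>
    intro xs hlen
    have hxs : xs = [] := List.length_eq_zero_iff.mp (Nat.le_zero.mp hlen)
    subst hxs
    constructor
    · intro acc _; simp [pvGoB]
    · intro acc p; simp [pvGoB, PySem.Str.join, PySem.Chars.join_nil]
  | succ n ih =>
    intro xs hlen
    cases xs with
    | nil =>
      constructor
      · intro acc _; simp [pvGoB]
      · intro acc p; simp [pvGoB, PySem.Str.join, PySem.Chars.join_nil]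
    | cons c rest =>
      have hrest : rest.length ≤ n := by simpa using Nat.succ_le_succ_iff.mp (by simpa using hlen)
      by_cases hal : PySem.Str.strIsalpha c = true
      · constructor
        · -- (1), alphabetic head: A appends (c, tag c), becoming pending
          intro acc hacc
          have hstep : pvStepA acc c = acc ++ [(c, some (pvTag c))] := by
            unfold pvStepA
            rw [if_pos hal]
            cases hlast : acc.getLast? with
            | none => rfl
            | some pr =>
              obtain ⟨prs, prt⟩ := pr
              have := hacc prs prt hlast
              subst this
              rfl
          rw [List.foldl_cons, hstep, (ih rest hrest).2 acc c]
          rw [pvGoB]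
          simp only [if_pos hal]
          rw [pvJoin_cons]
        · -- (2), alphabetic head: the pending p absorbs c
          intro acc p
          have hstep : pvStepA (acc ++ [(p, some (pvTag p))]) c =
              acc ++ [(p ++ c, some (pvTag (p ++ c)))] := by
            unfold pvStepA
            rw [if_pos hal]
            simp
          rw [List.foldl_cons, hstep, (ih rest hrest).2 acc (p ++ c)]
          simp only [List.takeWhile_cons, List.dropWhile_cons, hal, if_pos, pvJoin_cons,
            ← String.append_assoc]
      · have hal' : PySem.Str.strIsalpha c = false := by simpa using hal
        have halc : PySem.Chars.strIsalpha c.toList = false := by simpa using hal'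
        constructor
        · -- (1), non-alphabetic head: A appends (c, none), still no pending entry
          intro acc hacc
          have hstep : pvStepA acc c = acc ++ [(c, none)] := by
            unfold pvStepA; rw [if_neg (by simp [halc])]
          have hnp : pvNoPend (acc ++ [(c, none)]) := by
            intro pr t h; simp at h
            first | exact h.2 | exact h.2.symm
          rw [List.foldl_cons, hstep, (ih rest hrest).1 (acc ++ [(c, none)]) hnp]
          rw [pvGoB]
          simp [halc]
        · -- (2), non-alphabetic head: the pending entry is closed, (c, none) follows
          intro acc p
          have hstep : pvStepA (acc ++ [(p, some (pvTag p))]) c =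
              (acc ++ [(p, some (pvTag p))]) ++ [(c, none)] := by
            unfold pvStepA; rw [if_neg (by simp [halc])]
          have hnp : pvNoPend ((acc ++ [(p, some (pvTag p))]) ++ [(c, none)]) := by
            intro pr t h; simp at h
            first | exact h.2 | exact h.2.symm
          rw [List.foldl_cons, hstep, (ih rest hrest).1 _ hnp]
          simp only [List.takeWhile_cons, List.dropWhile_cons, hal', Bool.false_eq_true,
            if_false]
          rw [pvGoB]
          simp [halc, PySem.Str.join, PySem.Chars.join_nil]

-- ===== VERDICT (by name: the statement is the Claim_ definition above) =====
theorem merge_letter_chunks_spec : Claim_equal_merge_letter_chunks := by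
  intro chunks _
  unfold Spec_merge_letter_chunks merge_letter_chunks merge_letter_chunks_alt
  have := (pvMain chunks.length chunks le_rfl).1 [] (by intro pr t h; simp at h)
  simpa using this
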